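-- pv_equiv track=rewrite | github.com/ddoddii/algorithm | python/Problems/skct/problem1.py | solution
-- ===== SOURCE A (Python) =====
-- from collections import Counter
--
-- def solution(scores,darts):
--     # expense 계산
--     if len(darts) > 5:
--         expense = 10 + 5*(len(darts)-5)
--     else:
--         expense = 10
--
--     # row, column , score 계산
--     score = 0
--     row = []
--     column = []
--     unique_darts = list(set(darts)) #dart 중복 제거
--     for dart in unique_darts:
--         i = (dart-1) // 5
--         j = (dart-1) % 5
--         row.append(i)
--         column.append(j)
--         score += scores[i][j]
--
--     # Bingo 찾기
--     sub_list = [0, 1, 2, 3, 4]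
--
--     # row 연속 0,1,2,3,4 , column 같은 숫자 5개
--     bingo  = False
--     if all(item in row for item in sub_list):
--         c = Counter(column)
--         for _ , count in c.items():
--             if count == 5:
--                 bingo = True
--     # column 연속 0,1,2,3,4  , row 같은 숫자 5개
--     if all(item in column for item in sub_list):
--         r = Counter(row)
--         for _ , count in r.items():
--             if count == 5:
--                 bingo = True
--
--     if bingo:
--         fin_score = score - expense + 10
--     else:
--         fin_score = score - expense
--     return fin_score
-- ===== SOURCE B (Python) =====
-- def solution(scores, darts):
--     expense = 10 + 5 * max(0, len(darts) - 5)
--     cells = {divmod(d - 1, 5) for d in set(darts)}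
--     score = sum(scores[i][j] for i, j in cells)
--     bingo = any(all((r, c) in cells for c in range(5)) for r in range(5)) or \
--             any(all((r, c) in cells for r in range(5)) for c in range(5))
--     return score - expense + (10 if bingo else 0)
-- ===== Notes on version B (the rewrite author's own statement) =====
-- stated objective: simpler
-- what changed: B replaces A's parallel row/column lists plus Counter-based count==5 scans with a single set of occupied (i,j) cells and direct full-row/full-column checks over the 5x5 board, and folds the expense branch into a max().
-- outside the precondition, e.g. on solution([[1], [1], [1], [1], [1], [1]], [1, 6, 11, 16, 21, 26]): A returns -9, B returns 1
import Mathlib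
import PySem

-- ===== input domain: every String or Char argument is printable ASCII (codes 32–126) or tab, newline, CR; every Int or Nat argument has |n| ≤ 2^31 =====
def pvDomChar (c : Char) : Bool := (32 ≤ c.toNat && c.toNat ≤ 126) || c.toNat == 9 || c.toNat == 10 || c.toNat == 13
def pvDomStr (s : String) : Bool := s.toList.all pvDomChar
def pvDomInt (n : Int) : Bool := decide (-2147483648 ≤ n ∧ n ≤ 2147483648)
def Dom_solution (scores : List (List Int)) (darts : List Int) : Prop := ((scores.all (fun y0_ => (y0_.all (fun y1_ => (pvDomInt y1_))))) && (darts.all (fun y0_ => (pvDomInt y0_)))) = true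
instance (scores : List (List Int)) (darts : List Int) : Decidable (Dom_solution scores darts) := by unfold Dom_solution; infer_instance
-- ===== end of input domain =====

-- B replaces A's parallel row/column lists + Counter bingo scan with a set of occupied
-- (i,j) cells and direct full-row/full-column checks (simpler, same cost).


-- ===== PORT A =====
-- i = (dart-1) // 5 ; j = (dart-1) % 5  (shared arithmetic of both programs)
def pvCellI (dart : Int) : Int := PySem.Int.floordiv (dart - 1) 5
def pvCellJ (dart : Int) : Int := PySem.Int.mod (dart - 1) 5

-- loop body of A's 'for dart in unique_darts' (state = (row, column, score))
def pvStepA (scores : List (List Int)) (st : List Int × List Int × Int) (dart : Int) :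
    List Int × List Int × Int :=
  (st.1 ++ [pvCellI dart], st.2.1 ++ [pvCellJ dart],
    st.2.2 + PySem.List.pyGetD (PySem.List.pyGetD scores (pvCellI dart) []) (pvCellJ dart) 0)

def solution (scores : List (List Int)) (darts : List Int) : Int :=
  let expense : Int := if darts.length > 5 then 10 + 5 * ((darts.length : Int) - 5) else 10
  let unique_darts : List Int := PySem.Set.ofList darts
  let st := unique_darts.foldl (pvStepA scores) ([], [], 0)
  let row := st.1
  let column := st.2.1
  let score := st.2.2
  let sub_list : List Int := [0, 1, 2, 3, 4]
  let bingo := false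
  let bingo :=
    if sub_list.all (fun item => row.contains item) then
      (PySem.Dict.counter column).items.foldl (fun b p => if p.2 == 5 then true else b) bingo
    else bingo
  let bingo :=
    if sub_list.all (fun item => column.contains item) then
      (PySem.Dict.counter row).items.foldl (fun b p => if p.2 == 5 then true else b) bingo
    else bingo
  if bingo then score - expense + 10 else score - expense

-- ===== PORT B =====
def pvCell (d : Int) : Int × Int := (pvCellI d, pvCellJ d)

def solution_alt (scores : List (List Int)) (darts : List Int) : Int :=
  let expense : Int := 10 + 5 * max 0 ((darts.length : Int) - 5)
  let cells : PySem.Set (Int × Int) :=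
    PySem.Set.ofList ((PySem.Set.ofList darts).map pvCell)
  let score : Int :=
    (cells.map (fun c => PySem.List.pyGetD (PySem.List.pyGetD scores c.1 []) c.2 0)).sum
  let bingo :=
    ((List.range 5).any fun r => (List.range 5).all fun c =>
        PySem.Set.contains cells ((r : Int), (c : Int)))
    || ((List.range 5).any fun c => (List.range 5).all fun r =>
        PySem.Set.contains cells ((r : Int), (c : Int)))
  score - expense + (if bingo then 10 else 0)

-- ===== PRECONDITION & SPEC =====
-- Pre_ restricts to the 5×5 dartboard domain: every dart lies in 1..25 and its cell exists in
-- scores. Outside it A either raises IndexError or (for off-board darts that still reach a cell,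
-- possibly via negative-index wraparound) both programs' values are accidents of the flat-index
-- arithmetic that no specification pins down, so those inputs are excluded.
def Pre_solution (scores : List (List Int)) (darts : List Int) : Prop :=
  ∀ d ∈ darts, 1 ≤ d ∧ d ≤ 25 ∧
    ((d - 1) / 5).toNat < scores.length ∧
    ((d - 1) % 5).toNat < (scores.getD ((d - 1) / 5).toNat []).length
instance (scores : List (List Int)) (darts : List Int) : Decidable (Pre_solution scores darts) := by
  unfold Pre_solution; infer_instance

def pvWitness_solution : List (List Int) × List Int :=
  ([[3, 1, 4, 1, 5], [9, 2, 6, 5, 3], [5, 8, 9, 7, 9], [3, 2, 3, 8, 4], [6, 2, 6, 4, 3]],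
   [1, 6, 11, 16, 21, 2])

def Spec_solution (scores : List (List Int)) (darts : List Int) (out : Int) : Prop := out = solution_alt scores darts
instance (scores : List (List Int)) (darts : List Int) (out : Int) : Decidable (Spec_solution scores darts out) := by unfold Spec_solution; infer_instance

-- ===== CLAIM (what is proved, stated in full; the proofs are below) =====
def Claim_equal_solution : Prop := ∀ (scores : List (List Int)) (darts : List Int), Dom_solution scores darts → Pre_solution scores darts → Spec_solution scores darts (solution scores darts)

-- ===== LEMMAS AND PROOFS =====

lemma foldA (scores : List (List Int)) (U : List Int) (r c : List Int) (s : Int) :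
    U.foldl (pvStepA scores) (r, c, s) =
      (r ++ U.map pvCellI, c ++ U.map pvCellJ,
        s + (U.map (fun d =>
          PySem.List.pyGetD (PySem.List.pyGetD scores (pvCellI d) []) (pvCellJ d) 0)).sum) := by
  induction U generalizing r c s with
  | nil => simp
  | cons d U ih => simp [pvStepA, ih, List.append_assoc, add_assoc]

lemma foldBingo (l : List (Int × Int)) (b : Bool) :
    l.foldl (fun b p => if p.2 == 5 then true else b) b = (b || l.any (fun p => p.2 == 5)) := by
  induction l generalizing b with
  | nil => simp
  | cons p l ih =>
    rw [List.foldl_cons, List.any_cons, ih]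
    cases p.2 == 5 <;> simp

lemma ite_bool₁ (c x : Bool) : (if c = true then (false || x) else false) = (c && x) := by
  cases c <;> simp

lemma ite_bool₂ (c x b : Bool) : (if c = true then (b || x) else b) = (b || (c && x)) := by
  cases c <;> simp

lemma fin_form (S E : Int) (b : Bool) :
    (if b then S - E + 10 else S - E) = S - E + (if b then 10 else 0) := by
  cases b <;> simp

lemma pvCell_inj : Function.Injective pvCell := by
  intro a b h
  have ha := PySem.Int.floordiv_mul_add_mod (a - 1) 5
  have hb := PySem.Int.floordiv_mul_add_mod (b - 1) 5
  unfold pvCell at h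
  rw [Prod.mk.injEq] at h
  unfold pvCellI pvCellJ at h
  have : a - 1 = b - 1 := by rw [← ha, ← hb, h.1, h.2]
  omega

lemma cellI_bounds {d : Int} (h1 : 1 ≤ d) (h2 : d ≤ 25) : 0 ≤ pvCellI d ∧ pvCellI d ≤ 4 := by
  unfold pvCellI
  rw [PySem.Int.floordiv_eq_ediv_of_pos (by norm_num)]
  omega

lemma cellJ_bounds (d : Int) : 0 ≤ pvCellJ d ∧ pvCellJ d ≤ 4 := by
  unfold pvCellJ
  rw [PySem.Int.mod_eq_emod_of_pos (by norm_num)]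
  omega

lemma mem_range5 (x : Int) : x ∈ ([0, 1, 2, 3, 4] : List Int) ↔ 0 ≤ x ∧ x ≤ 4 := by
  simp only [List.mem_cons, List.not_mem_nil, or_false]
  omega

lemma count_map_eq_filter_length (g : Int → Int) (U : List Int) (j : Int) :
    (U.map g).count j = (U.filter (fun d => g d == j)).length := by
  rw [List.count_eq_countP, List.countP_map, List.countP_eq_length_filter]
  rfl

lemma all_contains_eq (L : List Int) :
    ((([0, 1, 2, 3, 4] : List Int).all (fun item => L.contains item)) = true) ↔
      ∀ k ∈ ([0, 1, 2, 3, 4] : List Int), k ∈ L := by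
  simp

lemma counter_any_eq (L : List Int) :
    (((PySem.Dict.counter L).items).any (fun p => p.2 == 5) = true) ↔ ∃ j, L.count j = 5 := by
  rw [PySem.Dict.items_counter]
  constructor
  · intro h
    obtain ⟨p, hp, h5⟩ := List.any_eq_true.1 h
    obtain ⟨k, hk, rfl⟩ := List.mem_map.1 hp
    refine ⟨k, ?_⟩
    have : ((L.count k : Int)) = 5 := by simpa using h5
    exact_mod_cast this
  · rintro ⟨j, hj⟩
    apply List.any_eq_true.2
    refine ⟨(j, (L.count j : Int)), List.mem_map.2 ⟨j, ?_, rfl⟩, by simp [hj]⟩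
    exact (PySem.Set.mem_ofList _ _).2 (List.count_pos_iff.1 (by omega))

lemma contains_cells_iff (U : List Int) (r c : Int) :
    (PySem.Set.contains (U.map pvCell) (r, c) = true) ↔
      ∃ d ∈ U, pvCellI d = r ∧ pvCellJ d = c := by
  simp [PySem.Set.contains, List.mem_map, pvCell, Prod.ext_iff]

lemma bingo_clause_iff (f g : Int → Int) (U : List Int) (hU : U.Nodup)
    (hf : ∀ d ∈ U, 0 ≤ f d ∧ f d ≤ 4) (hg : ∀ d ∈ U, 0 ≤ g d ∧ g d ≤ 4)
    (hinj : ∀ a b : Int, f a = f b → g a = g b → a = b) :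
    ((∀ k ∈ ([0, 1, 2, 3, 4] : List Int), k ∈ U.map f) ∧ ∃ j, (U.map g).count j = 5) ↔
      (∃ j ∈ ([0, 1, 2, 3, 4] : List Int), ∀ i ∈ ([0, 1, 2, 3, 4] : List Int),
        ∃ d ∈ U, f d = i ∧ g d = j) := by
  constructor
  · rintro ⟨-, j, hcount⟩
    rw [count_map_eq_filter_length] at hcount
    set F := U.filter (fun d => g d == j) with hF
    have hFmem : ∀ a, a ∈ F → a ∈ U ∧ g a = j := by
      intro a ha
      rw [hF, List.mem_filter] at ha
      exact ⟨ha.1, by simpa using ha.2⟩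
    have hFn : F.Nodup := hU.filter _
    have hmapn : (F.map f).Nodup := by
      refine List.Nodup.map_on ?_ hFn
      intro a ha b hb hfab
      exact hinj a b hfab ((hFmem a ha).2.trans (hFmem b hb).2.symm)
    have hsub : (F.map f) ⊆ [0, 1, 2, 3, 4] := by
      intro x hx
      obtain ⟨d, hd, rfl⟩ := List.mem_map.1 hx
      exact (mem_range5 _).2 (hf d (hFmem d hd).1)
    have hsp := List.subperm_of_subset hmapn hsub
    have hlen : (F.map f).length = 5 := by simp [hcount]
    have hperm := hsp.perm_of_length_le (by simp [hlen])
    have hFne : F ≠ [] := by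
      intro h
      rw [h] at hcount
      simp at hcount
    obtain ⟨d0, hd0⟩ := List.exists_mem_of_ne_nil F hFne
    have hjb : 0 ≤ j ∧ j ≤ 4 := by
      have hb := hg d0 (hFmem d0 hd0).1
      have heq := (hFmem d0 hd0).2
      omega
    refine ⟨j, (mem_range5 j).2 hjb, ?_⟩
    intro i hi
    have : i ∈ F.map f := hperm.symm.subset hi
    obtain ⟨d, hd, rfl⟩ := List.mem_map.1 this
    exact ⟨d, (hFmem d hd).1, rfl, (hFmem d hd).2⟩
  · rintro ⟨j, hj, hfull⟩
    constructor
    · intro k hk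
      obtain ⟨d, hdU, hfd, -⟩ := hfull k hk
      exact List.mem_map.2 ⟨d, hdU, hfd⟩
    · refine ⟨j, ?_⟩
      rw [count_map_eq_filter_length]
      set F := U.filter (fun d => g d == j) with hF
      have hFmem : ∀ a, a ∈ F → a ∈ U ∧ g a = j := by
        intro a ha
        rw [hF, List.mem_filter] at ha
        exact ⟨ha.1, by simpa using ha.2⟩
      have hFn : F.Nodup := hU.filter _
      have hmapn : (F.map f).Nodup := by
        refine List.Nodup.map_on ?_ hFn
        intro a ha b hb hfab
        exact hinj a b hfab ((hFmem a ha).2.trans (hFmem b hb).2.symm)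
      have hsub : (F.map f) ⊆ [0, 1, 2, 3, 4] := by
        intro x hx
        obtain ⟨d, hd, rfl⟩ := List.mem_map.1 hx
        exact (mem_range5 _).2 (hf d (hFmem d hd).1)
      have hsup : ([0, 1, 2, 3, 4] : List Int) ⊆ F.map f := by
        intro i hi
        obtain ⟨d, hdU, hfd, hgd⟩ := hfull i hi
        refine List.mem_map.2 ⟨d, ?_, hfd⟩
        rw [hF, List.mem_filter]
        exact ⟨hdU, by simp [hgd]⟩
      have h1 := List.subperm_of_subset hmapn hsub
      have h2 := List.subperm_of_subset (by decide) hsup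
      have := le_antisymm h1.length_le h2.length_le
      simpa using this

lemma anyRow_iff (U : List Int) :
    (((List.range 5).any fun r => (List.range 5).all fun c =>
        PySem.Set.contains (U.map pvCell) ((r : Int), (c : Int))) = true) ↔
      ∃ i ∈ ([0, 1, 2, 3, 4] : List Int), ∀ j ∈ ([0, 1, 2, 3, 4] : List Int),
        ∃ d ∈ U, pvCellJ d = j ∧ pvCellI d = i := by
  simp only [List.any_eq_true, List.all_eq_true, List.mem_range]
  constructor
  · rintro ⟨r, hr, hall⟩
    refine ⟨(r : Int), (mem_range5 _).2 (by omega), ?_⟩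
    intro j hj
    have hj' := (mem_range5 j).1 hj
    have h := hall j.toNat (by omega)
    rw [contains_cells_iff] at h
    have hcast : ((j.toNat : Nat) : Int) = j := by omega
    rw [hcast] at h
    obtain ⟨d, hd, h1, h2⟩ := h
    exact ⟨d, hd, h2, h1⟩
  · rintro ⟨i, hi, hall⟩
    have hi' := (mem_range5 i).1 hi
    refine ⟨i.toNat, by omega, ?_⟩
    intro c hc
    rw [contains_cells_iff]
    have hcast : ((i.toNat : Nat) : Int) = i := by omega
    obtain ⟨d, hd, h1, h2⟩ := hall (c : Int) ((mem_range5 _).2 (by omega))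
    exact ⟨d, hd, by rw [hcast]; exact h2, h1⟩

lemma anyCol_iff (U : List Int) :
    (((List.range 5).any fun c => (List.range 5).all fun r =>
        PySem.Set.contains (U.map pvCell) ((r : Int), (c : Int))) = true) ↔
      ∃ j ∈ ([0, 1, 2, 3, 4] : List Int), ∀ i ∈ ([0, 1, 2, 3, 4] : List Int),
        ∃ d ∈ U, pvCellI d = i ∧ pvCellJ d = j := by
  simp only [List.any_eq_true, List.all_eq_true, List.mem_range]
  constructor
  · rintro ⟨c, hc, hall⟩
    refine ⟨(c : Int), (mem_range5 _).2 (by omega), ?_⟩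
    intro i hi
    have hi' := (mem_range5 i).1 hi
    have h := hall i.toNat (by omega)
    rw [contains_cells_iff] at h
    have hcast : ((i.toNat : Nat) : Int) = i := by omega
    rw [hcast] at h
    exact h
  · rintro ⟨j, hj, hall⟩
    have hj' := (mem_range5 j).1 hj
    refine ⟨j.toNat, by omega, ?_⟩
    intro r hr
    rw [contains_cells_iff]
    have hcast : ((j.toNat : Nat) : Int) = j := by omega
    obtain ⟨d, hd, h1, h2⟩ := hall (r : Int) ((mem_range5 _).2 (by omega))
    exact ⟨d, hd, h1, by rw [hcast]; exact h2⟩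

lemma bingo_eq (U : List Int) (hU : U.Nodup) (hmem : ∀ d ∈ U, 1 ≤ d ∧ d ≤ 25) :
    (((([0, 1, 2, 3, 4] : List Int).all fun item => (U.map pvCellI).contains item) &&
        ((PySem.Dict.counter (U.map pvCellJ)).items.any fun p => p.2 == 5)) ||
      ((([0, 1, 2, 3, 4] : List Int).all fun item => (U.map pvCellJ).contains item) &&
        ((PySem.Dict.counter (U.map pvCellI)).items.any fun p => p.2 == 5)))
    = (((List.range 5).any fun r => (List.range 5).all fun c =>
          PySem.Set.contains (U.map pvCell) ((r : Int), (c : Int)))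
      || ((List.range 5).any fun c => (List.range 5).all fun r =>
          PySem.Set.contains (U.map pvCell) ((r : Int), (c : Int)))) := by
  have hfI : ∀ d ∈ U, 0 ≤ pvCellI d ∧ pvCellI d ≤ 4 :=
    fun d hd => cellI_bounds (hmem d hd).1 (hmem d hd).2
  have hfJ : ∀ d ∈ U, 0 ≤ pvCellJ d ∧ pvCellJ d ≤ 4 := fun d _ => cellJ_bounds d
  have hinj1 : ∀ a b : Int, pvCellI a = pvCellI b → pvCellJ a = pvCellJ b → a = b := by
    intro a b h1 h2
    apply pvCell_inj
    unfold pvCell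
    rw [h1, h2]
  have hinj2 : ∀ a b : Int, pvCellJ a = pvCellJ b → pvCellI a = pvCellI b → a = b := by
    intro a b h1 h2
    exact hinj1 a b h2 h1
  rw [Bool.eq_iff_iff]
  simp only [Bool.or_eq_true, Bool.and_eq_true]
  rw [all_contains_eq, all_contains_eq, counter_any_eq, counter_any_eq, anyRow_iff, anyCol_iff]
  constructor
  · rintro (h | h)
    · exact Or.inr ((bingo_clause_iff pvCellI pvCellJ U hU hfI hfJ hinj1).1 h)
    · exact Or.inl ((bingo_clause_iff pvCellJ pvCellI U hU hfJ hfI hinj2).1 h)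
  · rintro (h | h)
    · exact Or.inr ((bingo_clause_iff pvCellJ pvCellI U hU hfJ hfI hinj2).2 h)
    · exact Or.inl ((bingo_clause_iff pvCellI pvCellJ U hU hfI hfJ hinj1).2 h)

lemma sol_eq (scores : List (List Int)) (darts : List Int) (hpre : Pre_solution scores darts) :
    solution scores darts = solution_alt scores darts := by
  have hU : (PySem.Set.ofList darts).Nodup := PySem.Set.nodup_ofList darts
  have hmem : ∀ d ∈ PySem.Set.ofList darts, 1 ≤ d ∧ d ≤ 25 := by
    intro d hd
    have := hpre d ((PySem.Set.mem_ofList _ _).1 hd)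
    exact ⟨this.1, this.2.1⟩
  have hE : (if darts.length > 5 then (10 + 5 * ((darts.length : Int) - 5)) else 10)
      = 10 + 5 * max 0 ((darts.length : Int) - 5) := by
    by_cases h : darts.length > 5
    · rw [if_pos h, max_eq_right (by omega : (0 : Int) ≤ (darts.length : Int) - 5)]
    · rw [if_neg h, max_eq_left (by omega : ((darts.length : Int) - 5) ≤ 0)]
      norm_num
  have hcomp : ((fun c : Int × Int =>
        PySem.List.pyGetD (PySem.List.pyGetD scores c.1 []) c.2 0) ∘ pvCell)
      = (fun d => PySem.List.pyGetD (PySem.List.pyGetD scores (pvCellI d) []) (pvCellJ d) 0) := rfl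
  have hcellsN : (List.map pvCell (PySem.Set.ofList darts)).Nodup := hU.map pvCell_inj
  have hcells : PySem.Set.ofList (List.map pvCell (PySem.Set.ofList darts))
      = List.map pvCell (PySem.Set.ofList darts) := PySem.Set.ofList_eq_self_of_nodup _ hcellsN
  simp only [solution, solution_alt, foldA, List.nil_append, zero_add]
  rw [hcells]
  rw [List.map_map, hcomp, hE]
  rw [foldBingo, foldBingo, ite_bool₁, ite_bool₂]
  rw [bingo_eq (PySem.Set.ofList darts) hU hmem, fin_form]

-- ===== VERDICT (by name: the statement is the Claim_ definition above) =====
theorem solution_spec : Claim_equal_solution := by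
  intro scores darts _ hpre
  unfold Spec_solution
  exact sol_eq scores darts hpre
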